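-- pv_equiv track=rewrite | github.com/chmeliik/invipy | invis.py | encode_byte
-- ===== SOURCE A (Python) =====
-- ZERO = "\u200e"
--
-- ONE = "\u200f"
--
-- def encode_byte(normal_byte: int) -> str:
--     encoded_byte = ""
--     for shift in range(8):
--         if (normal_byte >> shift) & 1:
--             encoded_byte += ONE
--         else:
--             encoded_byte += ZERO
--     return encoded_byte
-- ===== SOURCE B (Python) =====
-- ZERO = "\u200e"
--
-- ONE = "\u200f"
--
-- _TABLE = str.maketrans("01", ZERO + ONE)
--
-- def encode_byte(normal_byte: int) -> str:
--     # binary text of the low 8 bits, LSB first, then table-driven substitution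
--     return format(normal_byte % 256, "08b")[::-1].translate(_TABLE)
-- ===== Notes on version B (the rewrite author's own statement) =====
-- stated objective: idiomatic
-- what changed: Replaced the explicit shift-and-branch accumulation loop by formatting the low byte as an 8-digit binary string, reversing it, and mapping the binary digits to the invisible characters via a str.translate table.
import Mathlib
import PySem

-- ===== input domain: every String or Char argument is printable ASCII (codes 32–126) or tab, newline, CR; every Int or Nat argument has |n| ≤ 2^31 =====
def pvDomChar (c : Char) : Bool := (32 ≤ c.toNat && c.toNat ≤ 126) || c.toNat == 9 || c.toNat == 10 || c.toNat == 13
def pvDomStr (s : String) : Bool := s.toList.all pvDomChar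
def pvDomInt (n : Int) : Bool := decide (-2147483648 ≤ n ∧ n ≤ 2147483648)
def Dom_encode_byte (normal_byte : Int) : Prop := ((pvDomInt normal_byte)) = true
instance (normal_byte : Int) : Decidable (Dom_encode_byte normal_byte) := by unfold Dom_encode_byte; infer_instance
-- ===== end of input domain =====

-- ===== PORT A =====
-- B replaces A's shift-and-branch loop by binary formatting + reversal + table substitution (idiomatic decomposition; same cost).
def encode_byte (normal_byte : Int) : String :=
  (PySem.List.pyRange 0 8 1).foldl
    (fun encoded_byte shift =>
      if PySem.Int.band (normal_byte >>> shift.toNat) 1 != 0 then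
        encoded_byte ++ "\u200f"
      else
        encoded_byte ++ "\u200e")
    ""

-- ===== PORT B =====
-- format(m, '08b') for 0 <= m < 256: binary digits of m left-padded with '0' to width 8 (exact on that range)
def pyFormat08b (m : Int) : List Char :=
  let digits := PySem.Int.toBinChars m
  List.replicate (8 - digits.length) '0' ++ digits

-- .translate(str.maketrans("01", ZERO + ONE)): '0' -> U+200E, '1' -> U+200F, everything else unchanged
def pvTranslate01 (c : Char) : Char :=
  if c = '0' then '\u200e' else if c = '1' then '\u200f' else c

def encode_byte_alt (normal_byte : Int) : String :=
  String.ofList (((pyFormat08b (PySem.Int.mod normal_byte 256)).reverse).map pvTranslate01)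

-- ===== PRECONDITION & SPEC =====
def Spec_encode_byte (normal_byte : Int) (out : String) : Prop := out = encode_byte_alt normal_byte
instance (normal_byte : Int) (out : String) : Decidable (Spec_encode_byte normal_byte out) := by unfold Spec_encode_byte; infer_instance

-- ===== CLAIM (what is proved, stated in full; the proofs are below) =====
def Claim_equal_encode_byte : Prop := ∀ (normal_byte : Int), Dom_encode_byte normal_byte → Spec_encode_byte normal_byte (encode_byte normal_byte)

-- ===== LEMMAS AND PROOFS =====

-- A only looks at the low 8 bits
theorem encode_byte_mod (n : Int) : encode_byte n = encode_byte (n % 256) := by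
  unfold encode_byte
  refine PySem.List.foldl_congr_mem _ _ _ _ ?_
  intro acc shift hs
  rw [PySem.List.mem_pyRange_one] at hs
  obtain ⟨h1, h2⟩ := hs
  have hb : n >>> (shift.toNat : Int) % 2 = (n % 256) >>> (shift.toNat : Int) % 2 := by
    rw [Int.shiftRight_natCast_right, Int.shiftRight_natCast_right,
        Int.shiftRight_eq_div_pow, Int.shiftRight_eq_div_pow]
    have hk8 : shift.toNat < 8 := by omega
    generalize hg : shift.toNat = k at hk8 ⊢
    interval_cases k <;> norm_num <;> omega
  simp only [PySem.Int.band_one, PySem.Int.mod_eq_emod_of_pos (by norm_num : (0:Int) < 2), hb]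

-- B reduces its argument modulo 256 first, so it is invariant under that reduction
theorem encode_byte_alt_mod (n : Int) : encode_byte_alt n = encode_byte_alt (n % 256) := by
  have h : (0 : Int) < 256 := by norm_num
  unfold encode_byte_alt
  rw [PySem.Int.mod_eq_emod_of_pos h, PySem.Int.mod_eq_emod_of_pos h,
    Int.emod_emod_of_dvd n dvd_rfl]

-- on the 256 residues the two ports agree, by computation
set_option maxRecDepth 40000 in
theorem agree_on_residues : ∀ m : Fin 256, encode_byte (m.val : Int) = encode_byte_alt (m.val : Int) := by
  decide

-- ===== VERDICT (by name: the statement is the Claim_ definition above) =====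
theorem encode_byte_spec : Claim_equal_encode_byte := by
  intro n _
  unfold Spec_encode_byte
  rw [encode_byte_mod n, encode_byte_alt_mod n]
  have h0 : 0 ≤ n % 256 := Int.emod_nonneg n (by norm_num)
  have h1 : n % 256 < 256 := Int.emod_lt_of_pos n (by norm_num)
  have := agree_on_residues ⟨(n % 256).toNat, by omega⟩
  simpa [Int.toNat_of_nonneg h0] using this
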